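-- pv_equiv track=rewrite | github.com/m0tl1ya/lib4me | dp.py | calculate_undulating_hills
-- ===== SOURCE A (Python) =====
-- def calculate_undulating_hills(heights):
--     """Compute by DP."""
--     # extend
--     tmp_h = heights + [max(heights)+1]
--     dp1 = [None] * len(heights)
--     for i in range(len(heights)-1, -1, -1):
--         dp1[i] = i + 1
--         while tmp_h[dp1[i]] <= tmp_h[i]:
--             dp1[i] = dp1[dp1[i]]
--     dif1 = [v-i-1 for i, v in enumerate(dp1)]
--
--     # extend
--     tmp_h = [max(heights)+1] + heights
--     dp2 = [None] * len(heights)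
--     for i in range(1, len(heights)+1):
--         dp2[i-1] = i - 1
--         while tmp_h[dp2[i-1]] <= tmp_h[i]:
--             dp2[i-1] = dp2[dp2[i-1]-1]
--     dif2 = [i-v for i, v in enumerate(dp2)]
--     return [i+j for i, j in zip(dif1, dif2)]
-- ===== SOURCE B (Python) =====
-- def calculate_undulating_hills(heights):
--     """For each position, count contiguous neighbours on both sides that are
--     not strictly greater, by a direct scan outward from each index."""
--     n = len(heights)
--     res = []
--     for i in range(n):
--         h = heights[i]
--         j = i + 1
--         while j < n and heights[j] <= h:
--             j += 1
--         k = i - 1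
--         while k >= 0 and heights[k] <= h:
--             k -= 1
--         res.append((j - i - 1) + (i - k - 1))
--     return res
-- ===== Notes on version B (the rewrite author's own statement) =====
-- stated objective: simpler
-- what changed: A computes next/previous strictly-greater positions with a jump-pointer DP over two sentinel-extended arrays; B just scans outward from each index with a direct break-on-greater loop, which is shorter and plainer (quadratic worst case vs A's near-linear DP).
import Mathlib
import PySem

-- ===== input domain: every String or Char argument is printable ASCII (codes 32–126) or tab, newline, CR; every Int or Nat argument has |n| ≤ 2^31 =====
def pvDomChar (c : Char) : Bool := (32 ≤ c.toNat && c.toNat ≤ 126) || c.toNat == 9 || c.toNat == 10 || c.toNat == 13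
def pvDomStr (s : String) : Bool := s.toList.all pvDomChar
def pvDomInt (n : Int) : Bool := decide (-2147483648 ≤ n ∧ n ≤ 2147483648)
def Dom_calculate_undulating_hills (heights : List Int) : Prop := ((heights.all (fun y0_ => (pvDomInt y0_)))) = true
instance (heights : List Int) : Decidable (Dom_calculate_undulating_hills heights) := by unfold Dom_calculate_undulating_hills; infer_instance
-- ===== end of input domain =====

-- B replaces A's jump-pointer DP by a direct outward scan per index (simpler, not faster).

-- ===== PORT A =====
-- while tmp_h[dp1[i]] <= tmp_h[i]: dp1[i] = dp1[dp1[i]]  (pointer p plays dp1[i]'s role;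
-- fuel = len(tmp_h) bounds the jumps, which strictly increase while in range)
def pvW1 (tmp : List Int) (dp : List Nat) (hi : Int) : Nat → Nat → Nat
  | p, 0 => p
  | p, f+1 => if tmp.getD p 0 ≤ hi then pvW1 tmp dp hi (dp.getD p 0) f else p

-- for i in range(len(heights)-1, -1, -1)
def pvLoop1 (tmp : List Int) : Nat → List Nat → List Nat
  | 0, dp => dp
  | i+1, dp => pvLoop1 tmp i (dp.set i (pvW1 tmp dp (tmp.getD i 0) (i+1) tmp.length))

-- while tmp_h[dp2[i-1]] <= tmp_h[i]: dp2[i-1] = dp2[dp2[i-1]-1]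
def pvW2 (tmp : List Int) (dp : List Nat) (hi : Int) : Nat → Nat → Nat
  | q, 0 => q
  | q, f+1 => if tmp.getD q 0 ≤ hi then pvW2 tmp dp hi (dp.getD (q-1) 0) f else q

-- for i in range(1, len(heights)+1)  (r = remaining iterations)
def pvLoop2 (tmp : List Int) : Nat → Nat → List Nat → List Nat
  | _, 0, dp => dp
  | i, r+1, dp => pvLoop2 tmp (i+1) r (dp.set (i-1) (pvW2 tmp dp (tmp.getD i 0) (i-1) tmp.length))

def calculate_undulating_hills (heights : List Int) : List Int :=
  match PySem.List.max? heights (fun y => y) with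
  | none => []   -- Python raises ValueError (max of empty) here; excluded by Pre_
  | some m =>
    let n := heights.length
    let tmp1 := heights ++ [m+1]
    let dp1 := pvLoop1 tmp1 n (List.replicate n 0)
    let dif1 := (PySem.List.enumerate dp1).map (fun p => (p.2 : Int) - p.1 - 1)
    let tmp2 := (m+1) :: heights
    let dp2 := pvLoop2 tmp2 1 n (List.replicate n 0)
    let dif2 := (PySem.List.enumerate dp2).map (fun p => p.1 - (p.2 : Int))
    List.zipWith (· + ·) dif1 dif2

-- ===== PORT B =====
-- while j < n and heights[j] <= h: j += 1
def altScanR (heights : List Int) (hv : Int) (j : Nat) : Nat :=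
  if hj : j < heights.length then
    if heights.getD j 0 ≤ hv then altScanR heights hv (j+1) else j
  else j
termination_by heights.length - j
decreasing_by omega

-- while k >= 0 and heights[k] <= h: k -= 1   (argument and result encode k as k+1, a Nat)
def altScanL (heights : List Int) (hv : Int) : Nat → Nat
  | 0 => 0
  | k+1 => if heights.getD k 0 ≤ hv then altScanL heights hv k else k+1

def calculate_undulating_hills_alt (heights : List Int) : List Int :=
  (List.range heights.length).map (fun i =>
    let hv := heights.getD i 0
    let j := altScanR heights hv (i+1)
    let k1 := altScanL heights hv i
    ((j : Int) - i - 1) + ((i : Int) - k1))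

-- ===== PRECONDITION & SPEC =====
-- Pre_ excludes only the empty list, on which Python A raises ValueError (max of empty sequence).
def Pre_calculate_undulating_hills (heights : List Int) : Prop := heights ≠ []
instance (heights : List Int) : Decidable (Pre_calculate_undulating_hills heights) := by
  unfold Pre_calculate_undulating_hills; infer_instance

def pvWitness_calculate_undulating_hills : List Int := [1, 3, 2, 2, 5]

def Spec_calculate_undulating_hills (heights : List Int) (out : List Int) : Prop :=
  out = calculate_undulating_hills_alt heights
instance (heights : List Int) (out : List Int) : Decidable (Spec_calculate_undulating_hills heights out) := by
  unfold Spec_calculate_undulating_hills; infer_instance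

-- ===== CLAIM (what is proved, stated in full; the proofs are below) =====
def Claim_equal_calculate_undulating_hills : Prop := ∀ (heights : List Int), Dom_calculate_undulating_hills heights → Pre_calculate_undulating_hills heights → Spec_calculate_undulating_hills heights (calculate_undulating_hills heights)

-- ===== LEMMAS AND PROOFS =====

-- proof-layer: length of the longest prefix with all elements ≤ c
def countLe (c : Int) : List Int → Nat
  | [] => 0
  | x :: xs => if x > c then 0 else countLe c xs + 1

-- first index (counting from i+1) of an element strictly greater than h[i], n if none
def nge (h : List Int) (i : Nat) : Nat := i + 1 + countLe (h.getD i 0) (h.drop (i+1))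
-- index in (m+1)::h coordinates of the previous strictly greater element
def pge (h : List Int) (k : Nat) : Nat := k - countLe (h.getD k 0) ((h.take k).reverse)

theorem countLe_le_length (c : Int) (l : List Int) : countLe c l ≤ l.length := by
  induction l with
  | nil => simp [countLe]
  | cons x xs ih => simp only [countLe]; split <;> simp <;> omega

theorem countLe_lt (c : Int) (l : List Int) : ∀ k, k < countLe c l → l.getD k 0 ≤ c := by
  induction l with
  | nil => simp [countLe]
  | cons x xs ih =>
    intro k hk
    simp only [countLe] at hk
    split at hk
    · omega
    · cases k with
      | zero => simpa using by omega
      | succ k => simpa using ih k (by omega)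

theorem countLe_break (c : Int) (l : List Int) (h : countLe c l < l.length) :
    c < l.getD (countLe c l) 0 := by
  induction l with
  | nil => simp [countLe] at h
  | cons x xs ih =>
    simp only [countLe] at h ⊢
    split at h <;> rename_i hx
    · simp only [if_pos hx]
      simpa using hx
    · simp only [if_neg hx] at h ⊢
      simp only [List.length_cons] at h
      simpa using ih (by omega)

theorem countLe_unique (c : Int) (l : List Int) (m : Nat) (hm : m ≤ l.length)
    (hall : ∀ k, k < m → l.getD k 0 ≤ c)
    (hbr : m = l.length ∨ c < l.getD m 0) : m = countLe c l := by
  induction l generalizing m with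
  | nil => simp at hm; simp [countLe, hm]
  | cons x xs ih =>
    simp only [countLe]
    split
    · rename_i hx
      by_contra hne
      have hm0 : 0 < m := by omega
      have := hall 0 hm0
      simp at this; omega
    · rename_i hx
      cases m with
      | zero =>
        rcases hbr with h | h
        · simp at h
        · simp at h; omega
      | succ m =>
        have := ih m (by simp at hm; omega)
          (fun k hk => by simpa using hall (k+1) (by omega))
          (by rcases hbr with h | h
              · left; simp at h; omega
              · right; simpa using h)
        omega

theorem getD_drop (l : List Int) (a j : Nat) (d : Int) :
    (l.drop a).getD j d = l.getD (a + j) d := by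
  induction a generalizing l with
  | zero => simp
  | succ a ih =>
    cases l with
    | nil => simp
    | cons x xs => simpa [Nat.succ_add] using ih xs

theorem getD_reverse (l : List Int) (j : Nat) (d : Int) (hj : j < l.length) :
    (l.reverse).getD j d = l.getD (l.length - 1 - j) d := by
  have h1 : j < l.reverse.length := by simpa using hj
  have h2 : l.length - 1 - j < l.length := by omega
  rw [List.getD_eq_getElem l.reverse d h1, List.getD_eq_getElem l d h2,
    List.getElem_reverse]

theorem getD_take_reverse (l : List Int) (k j : Nat) (d : Int) (hk : k ≤ l.length) (hj : j < k) :
    ((l.take k).reverse).getD j d = l.getD (k - 1 - j) d := by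
  have hlen : (l.take k).length = k := by simp; omega
  rw [getD_reverse _ _ _ (by rw [hlen]; exact hj), hlen]
  rw [List.getD_eq_getElem _ d (by rw [hlen]; omega), List.getD_eq_getElem l d (by omega),
    List.getElem_take]

theorem getD_append_lt (l l2 : List Int) (j : Nat) (d : Int) (h : j < l.length) :
    (l ++ l2).getD j d = l.getD j d := by
  rw [List.getD_eq_getElem _ d (by simp; omega), List.getD_eq_getElem l d h,
    List.getElem_append_left h]

theorem getD_append_self (l : List Int) (a d : Int) : (l ++ [a]).getD l.length d = a := by
  rw [List.getD_eq_getElem _ d (by simp)]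
  simp

theorem getD_cons_pos (a : Int) (l : List Int) (q : Nat) (d : Int) (h : 1 ≤ q) :
    ((a :: l).getD q d) = l.getD (q - 1) d := by
  cases q with
  | zero => omega
  | succ q => simp [List.getD]

theorem getD_le_max (h : List Int) (m : Int) (hm : ∀ y ∈ h, y ≤ m) (i : Nat)
    (hi : i < h.length) : h.getD i 0 ≤ m := by
  refine hm _ ?_
  rw [List.getD_eq_getElem _ _ hi]
  exact List.getElem_mem _

theorem getD_set_self (l : List Nat) (a v : Nat) (h : a < l.length) :
    (l.set a v).getD a 0 = v := by
  rw [List.getD_eq_getElem _ _ (by simpa using h)]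
  simp [List.getElem_set, h]

theorem getD_set_ne (l : List Nat) (a j v : Nat) (h : j ≠ a) :
    (l.set a v).getD j 0 = l.getD j 0 := by
  simp [List.getD, List.getElem?_set_ne (Ne.symm h)]

theorem nge_bounds (h : List Int) (i : Nat) (hi : i < h.length) :
    i < nge h i ∧ nge h i ≤ h.length := by
  have := countLe_le_length (h.getD i 0) (h.drop (i+1))
  simp only [List.length_drop] at this
  unfold nge; omega

theorem nge_between (h : List Int) (i k : Nat) (hik : i < k) (hk : k < nge h i) :
    h.getD k 0 ≤ h.getD i 0 := by
  have := countLe_lt (h.getD i 0) (h.drop (i+1)) (k - i - 1) (by unfold nge at hk; omega)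
  rwa [getD_drop, show i + 1 + (k - i - 1) = k by omega] at this

theorem nge_gt (h : List Int) (m : Int) (hm : ∀ y ∈ h, y ≤ m) (i : Nat) (hi : i < h.length) :
    h.getD i 0 < (h ++ [m+1]).getD (nge h i) 0 := by
  set c := countLe (h.getD i 0) (h.drop (i+1)) with hc
  have hle := countLe_le_length (h.getD i 0) (h.drop (i+1))
  simp only [List.length_drop, ← hc] at hle
  by_cases hlt : c < h.length - (i+1)
  · have hb := countLe_break (h.getD i 0) (h.drop (i+1)) (by simpa using hlt)
    rw [← hc, getD_drop] at hb
    have hnge : nge h i < h.length := by unfold nge; omega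
    rw [getD_append_lt _ _ _ _ hnge]
    simpa [nge, ← hc] using hb
  · have heq : nge h i = h.length := by unfold nge; omega
    rw [heq, getD_append_self]
    have := getD_le_max h m hm i hi
    omega

theorem nge_unique (h : List Int) (m : Int) (i p : Nat)
    (hi : i < h.length) (hip : i < p) (hpn : p ≤ h.length)
    (hall : ∀ k, i < k → k < p → h.getD k 0 ≤ h.getD i 0)
    (hgt : h.getD i 0 < (h ++ [m+1]).getD p 0) : p = nge h i := by
  have := countLe_unique (h.getD i 0) (h.drop (i+1)) (p - i - 1)
    (by simp only [List.length_drop]; omega)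
    (by intro k hk
        rw [getD_drop]
        exact hall _ (by omega) (by omega))
    (by by_cases hpe : p = h.length
        · left; simp only [hpe, List.length_drop]; omega
        · right
          rw [getD_drop, show i + 1 + (p - i - 1) = p by omega]
          rwa [getD_append_lt _ _ _ _ (by omega)] at hgt)
  unfold nge; omega

theorem le_nge (h : List Int) (m : Int) (hm : ∀ y ∈ h, y ≤ m) (i p : Nat)
    (hi : i < h.length) (hip : i < p) (hpn : p ≤ h.length)
    (hall : ∀ k, i < k → k < p → h.getD k 0 ≤ h.getD i 0) : p ≤ nge h i := by
  by_contra hlt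
  push_neg at hlt
  have h1 := nge_bounds h i hi
  have h2 := nge_gt h m hm i hi
  rw [getD_append_lt _ _ _ _ (by omega)] at h2
  have := hall (nge h i) (by omega) (by omega)
  omega

theorem pvW1_eq (h : List Int) (m : Int) (hm : ∀ y ∈ h, y ≤ m) (dp : List Nat) (i : Nat)
    (hi : i < h.length)
    (hdp : ∀ j, i < j → j < h.length → dp.getD j 0 = nge h j) :
    ∀ fuel p, i < p → p ≤ h.length →
      (∀ k, i < k → k < p → h.getD k 0 ≤ h.getD i 0) →
      nge h i ≤ p + fuel →
      pvW1 (h ++ [m+1]) dp (h.getD i 0) p fuel = nge h i := by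
  intro fuel
  induction fuel with
  | zero =>
    intro p hip hpn hall hfu
    have := le_nge h m hm i p hi hip hpn hall
    have : p = nge h i := by omega
    simpa [pvW1] using this
  | succ f ih =>
    intro p hip hpn hall hfu
    simp only [pvW1]
    by_cases hcond : (h ++ [m+1]).getD p 0 ≤ h.getD i 0
    · rw [if_pos hcond]
      have hpn' : p < h.length := by
        by_contra hpe
        have hpe' : p = h.length := by omega
        rw [hpe', getD_append_self] at hcond
        have := getD_le_max h m hm i hi
        omega
      rw [getD_append_lt _ _ _ _ hpn'] at hcond
      rw [hdp p hip hpn']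
      have hb := nge_bounds h p hpn'
      have hplt := le_nge h m hm i p hi hip hpn hall
      refine ih (nge h p) (by omega) (by omega) ?_ (by omega)
      intro k hik hk
      by_cases hkp : k < p
      · exact hall k hik hkp
      · by_cases hke : k = p
        · rwa [hke]
        · exact le_trans (nge_between h p k (by omega) hk) hcond
    · rw [if_neg hcond]
      push_neg at hcond
      exact nge_unique h m i p hi hip hpn hall hcond

theorem pvLoop1_length (tmp : List Int) : ∀ i dp, (pvLoop1 tmp i dp).length = dp.length := by
  intro i
  induction i with
  | zero => intro dp; simp [pvLoop1]
  | succ i ih => intro dp; simp [pvLoop1, ih]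

theorem pvLoop1_getD (h : List Int) (m : Int) (hm : ∀ y ∈ h, y ≤ m) :
    ∀ i dp, i ≤ h.length → dp.length = h.length →
      (∀ j, i ≤ j → j < h.length → dp.getD j 0 = nge h j) →
      ∀ j, j < h.length → (pvLoop1 (h ++ [m+1]) i dp).getD j 0 = nge h j := by
  intro i
  induction i with
  | zero => intro dp _ _ hinv j hj; simpa [pvLoop1] using hinv j (by omega) hj
  | succ i ih =>
    intro dp hin hlen hinv j hj
    simp only [pvLoop1]
    have hi : i < h.length := by omega
    have hval : pvW1 (h ++ [m+1]) dp ((h ++ [m+1]).getD i 0) (i+1) (h ++ [m+1]).length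
        = nge h i := by
      rw [getD_append_lt _ _ _ _ hi]
      have hb := nge_bounds h i hi
      refine pvW1_eq h m hm dp i hi (fun j h1 h2 => hinv j (by omega) h2)
        _ (i+1) (by omega) (by omega) (by intro k h1 h2; omega) ?_
      simp only [List.length_append, List.length_cons, List.length_nil]
      omega
    refine ih _ (by omega) (by simpa using hlen) ?_ j hj
    intro j' hij' hj'
    by_cases hje : j' = i
    · rw [hje, hval, getD_set_self _ _ _ (by omega)]
    · rw [getD_set_ne _ _ _ _ hje]
      exact hinv j' (by omega) hj'

theorem countLe_take_le (h : List Int) (k : Nat) (hk : k ≤ h.length) :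
    countLe (h.getD k 0) ((h.take k).reverse) ≤ k := by
  have := countLe_le_length (h.getD k 0) ((h.take k).reverse)
  simpa [Nat.min_eq_left hk] using this

theorem pge_between (h : List Int) (k j : Nat) (hk : k ≤ h.length)
    (hj1 : pge h k ≤ j) (hj2 : j < k) : h.getD j 0 ≤ h.getD k 0 := by
  have hc := countLe_take_le h k hk
  have := countLe_lt (h.getD k 0) ((h.take k).reverse) (k - 1 - j) (by unfold pge at hj1; omega)
  rwa [getD_take_reverse _ _ _ _ hk (by omega),
    show k - 1 - (k - 1 - j) = j by omega] at this

theorem pge_gt (h : List Int) (m : Int) (hm : ∀ y ∈ h, y ≤ m) (k : Nat) (hk : k < h.length) :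
    h.getD k 0 < ((m+1) :: h).getD (pge h k) 0 := by
  set c := countLe (h.getD k 0) ((h.take k).reverse) with hc
  have hcle := countLe_take_le h k (by omega)
  by_cases hck : c = k
  · have hp0 : pge h k = 0 := by unfold pge; omega
    rw [hp0, List.getD_cons_zero]
    have := getD_le_max h m hm k hk
    omega
  · have hclt : c < k := by omega
    have hb := countLe_break (h.getD k 0) ((h.take k).reverse)
      (by simp only [List.length_reverse, List.length_take]; omega)
    rw [← hc, getD_take_reverse _ _ _ _ (by omega) hclt] at hb
    have hp1 : 1 ≤ pge h k := by unfold pge; omega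
    rw [getD_cons_pos _ _ _ _ hp1]
    have : pge h k - 1 = k - 1 - c := by unfold pge; omega
    rw [this]
    exact hb

theorem pge_unique (h : List Int) (m : Int) (k q : Nat) (hk : k < h.length) (hq : q ≤ k)
    (hall : ∀ j, q ≤ j → j < k → h.getD j 0 ≤ h.getD k 0)
    (hgt : h.getD k 0 < ((m+1) :: h).getD q 0) : q = pge h k := by
  have := countLe_unique (h.getD k 0) ((h.take k).reverse) (k - q)
    (by simp only [List.length_reverse, List.length_take]; omega)
    (by intro r hr
        rw [getD_take_reverse _ _ _ _ (by omega) (by omega)]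
        exact hall _ (by omega) (by omega))
    (by by_cases hq0 : q = 0
        · left; simp only [List.length_reverse, List.length_take]; omega
        · right
          rw [getD_take_reverse _ _ _ _ (by omega) (by omega),
            show k - 1 - (k - q) = q - 1 by omega]
          rwa [getD_cons_pos _ _ _ _ (by omega)] at hgt)
  unfold pge; omega

theorem pge_le_q (h : List Int) (m : Int) (hm : ∀ y ∈ h, y ≤ m) (k q : Nat)
    (hk : k < h.length) (hq : q ≤ k)
    (hall : ∀ j, q ≤ j → j < k → h.getD j 0 ≤ h.getD k 0) : pge h k ≤ q := by
  by_contra hlt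
  push_neg at hlt
  have hc := countLe_take_le h k (by omega)
  have hb : pge h k ≤ k := by unfold pge; omega
  have h2 := pge_gt h m hm k hk
  rw [getD_cons_pos _ _ _ _ (by omega)] at h2
  have := hall (pge h k - 1) (by omega) (by omega)
  omega

theorem pvW2_eq (h : List Int) (m : Int) (hm : ∀ y ∈ h, y ≤ m) (dp : List Nat) (k : Nat)
    (hk : k < h.length)
    (hdp : ∀ j, j < k → dp.getD j 0 = pge h j) :
    ∀ fuel q, q ≤ k →
      (∀ j, q ≤ j → j < k → h.getD j 0 ≤ h.getD k 0) →
      q ≤ pge h k + fuel →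
      pvW2 ((m+1) :: h) dp (h.getD k 0) q fuel = pge h k := by
  intro fuel
  induction fuel with
  | zero =>
    intro q hq hall hfu
    have := pge_le_q h m hm k q hk hq hall
    have : q = pge h k := by omega
    simpa [pvW2] using this
  | succ f ih =>
    intro q hq hall hfu
    simp only [pvW2]
    by_cases hcond : ((m+1) :: h).getD q 0 ≤ h.getD k 0
    · rw [if_pos hcond]
      have hq1 : 1 ≤ q := by
        by_contra hq0
        have : q = 0 := by omega
        rw [this, List.getD_cons_zero] at hcond
        have := getD_le_max h m hm k hk
        omega
      rw [getD_cons_pos _ _ _ _ hq1] at hcond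
      have hq1k : q - 1 < k := by omega
      rw [hdp (q-1) hq1k]
      have hple := countLe_take_le h (q-1) (by omega)
      have hp' : pge h (q-1) ≤ q - 1 := by unfold pge; omega
      have hpk := pge_le_q h m hm k q hk hq hall
      refine ih (pge h (q-1)) (by omega) ?_ (by omega)
      intro j hj1 hj2
      by_cases hjq : q ≤ j
      · exact hall j hjq hj2
      · by_cases hje : j = q - 1
        · rwa [hje]
        · exact le_trans (pge_between h (q-1) j (by omega) (by omega) (by omega)) hcond
    · rw [if_neg hcond]
      push_neg at hcond
      exact pge_unique h m k q hk hq hall hcond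

theorem pvLoop2_length (tmp : List Int) : ∀ r i dp, (pvLoop2 tmp i r dp).length = dp.length := by
  intro r
  induction r with
  | zero => intro i dp; simp [pvLoop2]
  | succ r ih => intro i dp; simp [pvLoop2, ih]

theorem pvLoop2_getD (h : List Int) (m : Int) (hm : ∀ y ∈ h, y ≤ m) :
    ∀ r i dp, 1 ≤ i → i + r = h.length + 1 → dp.length = h.length →
      (∀ j, j < i - 1 → dp.getD j 0 = pge h j) →
      ∀ j, j < h.length → (pvLoop2 ((m+1) :: h) i r dp).getD j 0 = pge h j := by
  intro r
  induction r with
  | zero =>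
    intro i dp hi1 hir _ hinv j hj
    simpa [pvLoop2] using hinv j (by omega)
  | succ r ih =>
    intro i dp hi1 hir hlen hinv j hj
    simp only [pvLoop2]
    have hkn : i - 1 < h.length := by omega
    have hval : pvW2 ((m+1) :: h) dp (((m+1) :: h).getD i 0) (i-1) ((m+1) :: h).length
        = pge h (i-1) := by
      rw [getD_cons_pos _ _ _ _ hi1]
      have hc := countLe_take_le h (i-1) (by omega)
      have : pge h (i-1) ≤ i - 1 := by unfold pge; omega
      refine pvW2_eq h m hm dp (i-1) hkn (fun j hj' => hinv j hj')
        _ (i-1) (by omega) (by intro j h1 h2; omega) ?_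
      simp only [List.length_cons]
      omega
    refine ih (i+1) _ (by omega) (by omega) (by simpa using hlen) ?_ j hj
    intro j' hj'
    by_cases hje : j' = i - 1
    · rw [hje, hval, getD_set_self _ _ _ (by omega)]
    · rw [getD_set_ne _ _ _ _ hje]
      exact hinv j' (by omega)

theorem altScanR_eq (heights : List Int) (hv : Int) :
    ∀ fuel j, heights.length ≤ j + fuel →
      altScanR heights hv j = j + countLe hv (heights.drop j) := by
  intro fuel
  induction fuel with
  | zero =>
    intro j hf
    have hd : heights.drop j = [] := List.drop_eq_nil_of_le (by omega)
    rw [altScanR, dif_neg (by omega), hd]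
    simp [countLe]
  | succ f ih =>
    intro j hf
    rw [altScanR]
    by_cases hj : j < heights.length
    · rw [dif_pos hj]
      have hd : heights.drop j = heights.getD j 0 :: heights.drop (j+1) := by
        rw [List.getD_eq_getElem _ _ hj]
        exact List.drop_eq_getElem_cons hj
      by_cases hle : heights.getD j 0 ≤ hv
      · rw [if_pos hle, ih (j+1) (by omega), hd]
        simp only [countLe, if_neg (by omega : ¬ heights.getD j 0 > hv)]
        omega
      · rw [if_neg hle, hd]
        simp only [countLe, if_pos (by omega : heights.getD j 0 > hv)]
        omega
    · rw [dif_neg hj]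
      have hd : heights.drop j = [] := List.drop_eq_nil_of_le (by omega)
      rw [hd]; simp [countLe]

theorem altScanL_eq (heights : List Int) (hv : Int) :
    ∀ i, i ≤ heights.length →
      altScanL heights hv i = i - countLe hv ((heights.take i).reverse) := by
  intro i
  induction i with
  | zero => simp [altScanL, countLe]
  | succ k ih =>
    intro hk
    have hkn : k < heights.length := by omega
    have hd : (heights.take (k+1)).reverse = heights.getD k 0 :: (heights.take k).reverse := by
      rw [List.take_succ, List.getD_eq_getElem _ _ hkn]
      simp [List.getElem?_eq_getElem hkn]
    have hlen := countLe_le_length hv ((heights.take k).reverse)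
    simp only [List.length_reverse, List.length_take] at hlen
    rw [altScanL, hd]
    by_cases hle : heights.getD k 0 ≤ hv
    · rw [if_pos hle, ih (by omega)]
      simp only [countLe, if_neg (by omega : ¬ heights.getD k 0 > hv)]
      omega
    · rw [if_neg hle]
      simp only [countLe, if_pos (by omega : heights.getD k 0 > hv)]
      omega

-- ===== VERDICT (by name: the statement is the Claim_ definition above) =====
theorem calculate_undulating_hills_spec : Claim_equal_calculate_undulating_hills := by
  intro heights _ hpre
  unfold Spec_calculate_undulating_hills calculate_undulating_hills
  obtain ⟨m, hmax⟩ : ∃ m, PySem.List.max? heights (fun y => y) = some m := by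
    cases hx : PySem.List.max? heights (fun y => y) with
    | none => exact absurd (((PySem.List.max?_eq_none_iff _ _).mp hx)) hpre
    | some m => exact ⟨m, rfl⟩
  have hm : ∀ y ∈ heights, y ≤ m := fun y hy => PySem.List.max?_isMax hmax y hy
  rw [hmax]
  have hdp1len : (pvLoop1 (heights ++ [m+1]) heights.length
      (List.replicate heights.length 0)).length = heights.length := by
    rw [pvLoop1_length]; simp
  have hdp1 := pvLoop1_getD heights m hm heights.length (List.replicate heights.length 0)
    le_rfl (by simp) (fun j h1 h2 => absurd h2 (by omega))
  have hdp2len : (pvLoop2 ((m+1) :: heights) 1 heights.length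
      (List.replicate heights.length 0)).length = heights.length := by
    rw [pvLoop2_length]; simp
  have hdp2 := pvLoop2_getD heights m hm heights.length 1 (List.replicate heights.length 0)
    le_rfl (by omega) (by simp) (fun j h1 => absurd h1 (by omega))
  apply List.ext_getElem
  · simp [calculate_undulating_hills_alt, hdp1len, hdp2len]
  · intro j hj1 hj2
    have hjn : j < heights.length := by
      simpa [hdp1len, hdp2len] using hj1
    rw [List.getElem_zipWith, List.getElem_map, List.getElem_map,
      PySem.List.getElem_enumerate, PySem.List.getElem_enumerate]
    simp only [calculate_undulating_hills_alt, List.getElem_map, List.getElem_range]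
    rw [altScanR_eq heights (heights.getD j 0) heights.length (j+1) (by omega),
      altScanL_eq heights (heights.getD j 0) j (by omega)]
    have e1 : (pvLoop1 (heights ++ [m+1]) heights.length
        (List.replicate heights.length 0))[j]'(by omega) = nge heights j := by
      rw [← List.getD_eq_getElem _ 0 (by omega)]
      exact hdp1 j hjn
    have e2 : (pvLoop2 ((m+1) :: heights) 1 heights.length
        (List.replicate heights.length 0))[j]'(by omega) = pge heights j := by
      rw [← List.getD_eq_getElem _ 0 (by omega)]
      exact hdp2 j hjn
    rw [e1, e2]
    have hc2 := countLe_take_le heights j (by omega)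
    unfold nge pge
    push_cast
    omega
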